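-- pv_equiv track=rewrite | github.com/gcd0318/pe | l5/pe107.py | weight_dict
-- ===== SOURCE A (Python) =====
-- def weight_dict(mapd):
--     resd = {}
--     for s in mapd:
--         for e in mapd[s]:
--             if mapd[s][e] in resd:
--                 resd[mapd[s][e]].append((s, e))
--             else:
--                 resd[mapd[s][e]] = [(s, e)]
--     return resd
-- ===== SOURCE B (Python) =====
-- def weight_dict(mapd):
--     edges = [(mapd[s][e], (s, e)) for s in mapd for e in mapd[s]]
--     keys = list(dict.fromkeys(w for w, _ in edges))
--     return {w: [p for w2, p in edges if w2 == w] for w in keys}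
-- ===== Notes on version B (the rewrite author's own statement) =====
-- stated objective: alternative
-- what changed: Replaces the single-pass dict-bucketing (membership test, append-or-create per edge) by a three-phase computation: flatten all edges to a (weight, edge) list, deduplicate the weights in first-occurrence order, then build each weight's bucket by filtering the flat list.
import Mathlib
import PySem

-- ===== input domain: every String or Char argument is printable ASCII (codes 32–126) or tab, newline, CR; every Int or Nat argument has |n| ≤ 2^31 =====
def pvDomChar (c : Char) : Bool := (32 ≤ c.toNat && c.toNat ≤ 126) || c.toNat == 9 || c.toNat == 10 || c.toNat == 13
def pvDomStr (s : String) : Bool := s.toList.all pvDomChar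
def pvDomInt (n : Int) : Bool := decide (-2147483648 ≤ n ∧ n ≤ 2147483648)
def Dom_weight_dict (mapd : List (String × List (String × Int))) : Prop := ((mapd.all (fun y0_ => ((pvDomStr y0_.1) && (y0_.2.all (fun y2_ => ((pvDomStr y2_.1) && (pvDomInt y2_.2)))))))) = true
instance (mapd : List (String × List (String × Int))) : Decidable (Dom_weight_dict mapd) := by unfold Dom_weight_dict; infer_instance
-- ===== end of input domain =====

-- B replaces the single-pass dict bucketing by flatten / dedup keys / per-key filter (alternative decomposition, same result).

-- ===== PORT A =====
-- resd is the dict being built; the two branches of A's 'if mapd[s][e] in resd' are kept.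
def weight_dict (mapd : List (String × List (String × Int))) : List (Int × List (String × String)) :=
  (mapd.foldl (fun resd p =>
    p.2.foldl (fun resd q =>
      if resd.contains q.2 then
        resd.insert q.2 (resd.getD q.2 [] ++ [(p.1, q.1)])
      else
        resd.insert q.2 [(p.1, q.1)])
      resd)
    (PySem.Dict.empty : PySem.Dict Int (List (String × String)))).items

-- ===== PORT B =====
def weight_dict_alt (mapd : List (String × List (String × Int))) : List (Int × List (String × String)) :=
  let edges := mapd.flatMap (fun p => p.2.map (fun q => (q.2, (p.1, q.1))))
  let keys := PySem.List.dedup (edges.map (·.1))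
  keys.map (fun w => (w, (edges.filter (fun p => p.1 == w)).map (·.2)))

-- ===== PRECONDITION & SPEC =====
def Spec_weight_dict (mapd : List (String × List (String × Int))) (out : List (Int × List (String × String))) : Prop := out = weight_dict_alt mapd
instance (mapd : List (String × List (String × Int))) (out : List (Int × List (String × String))) : Decidable (Spec_weight_dict mapd out) := by unfold Spec_weight_dict; infer_instance

-- ===== CLAIM (what is proved, stated in full; the proofs are below) =====
def Claim_equal_weight_dict : Prop := ∀ (mapd : List (String × List (String × Int))), Dom_weight_dict mapd → Spec_weight_dict mapd (weight_dict mapd)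

-- ===== LEMMAS AND PROOFS =====

-- A's inner if/else step is exactly 'd.modify w [] (· ++ [p])'.
theorem pv_step_eq_modify (d : PySem.Dict Int (List (String × String)))
    (w : Int) (p : String × String) :
    (if d.contains w then d.insert w (d.getD w [] ++ [p]) else d.insert w [p])
      = d.modify w [] (· ++ [p]) := by
  by_cases h : d.contains w = true
  · simp [PySem.Dict.modify, h]
  · rw [Bool.not_eq_true] at h
    simp [PySem.Dict.modify, h, PySem.Dict.getD_of_not_contains _ _ h]

-- the nested modify-fold over mapd is the modify-fold over the flattened edge list
theorem pv_nested_foldl (mapd : List (String × List (String × Int)))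
    (d : PySem.Dict Int (List (String × String))) :
    mapd.foldl (fun resd p =>
      p.2.foldl (fun resd q => resd.modify q.2 [] (· ++ [(p.1, q.1)])) resd) d
      = (mapd.flatMap (fun p => p.2.map (fun q => (q.2, (p.1, q.1))))).foldl
          (fun resd x => resd.modify x.1 [] (· ++ [x.2])) d := by
  induction mapd generalizing d with
  | nil => rfl
  | cons hd tl ih =>
    simp only [List.foldl_cons, List.flatMap_cons, List.foldl_append, ih, List.foldl_map]

-- ===== VERDICT (by name: the statement is the Claim_ definition above) =====
theorem weight_dict_spec : Claim_equal_weight_dict := by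
  intro mapd _
  unfold Spec_weight_dict weight_dict weight_dict_alt
  simp only [pv_step_eq_modify, pv_nested_foldl]
  set edges := mapd.flatMap (fun p => p.2.map (fun q => (q.2, (p.1, q.1)))) with hedges
  set D := edges.foldl (fun resd x => resd.modify x.1 [] (· ++ [x.2])) PySem.Dict.empty with hD
  have hkeys : D.keys = PySem.List.dedup (edges.map (·.1)) := by
    rw [hD, PySem.Dict.keys_foldl_modify_key, PySem.Dict.keys_empty,
      PySem.Set.update_nil_left, PySem.List.dedup_eq_ofList]
  have hnd : D.keys.Nodup := by
    exact PySem.Dict.nodup_keys_foldl_modify_key edges (·.1) [] (fun d x => (· ++ [x.2]))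
      PySem.Dict.empty PySem.Dict.nodup_keys_empty
  rw [PySem.Dict.items_eq_map_keys D hnd [], hkeys]
  refine (List.map_congr_left ?_).symm
  intro w _
  rw [hD, PySem.Dict.getD_foldl_modify_append, PySem.Dict.getD_empty]
  simp
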